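-- pv_equiv track=rewrite | github.com/VanBladee/PDE | src/extractors/opendental/claims_od_connector/claimsMatchingOpenDental.py | normalize_procedure_code
-- ===== SOURCE A (Python) =====
-- def normalize_procedure_code(code: str) -> str:
--     if not code:
--         return code
--     if code.startswith('D') and len(code) > 5 and code[1:].isdigit():
--         digits = code[1:]
--         if len(digits) > 4:
--             while len(digits) > 4 and digits[0] == '0':
--                 digits = digits[1:]
--         code = 'D' + digits
--     elif not code.startswith('D') and code.isdigit():
--         code = 'D' + code
--     return code
-- ===== SOURCE B (Python) =====
-- def normalize_procedure_code(code: str) -> str: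
--     if not code:
--         return code
--     if code.startswith('D') and len(code) > 5 and code[1:].isdigit():
--         digits = code[1:]
--         stripped = digits.lstrip('0')
--         keep = max(len(stripped), 4)
--         return 'D' + digits[len(digits) - keep:]
--     if not code.startswith('D') and code.isdigit():
--         return 'D' + code
--     return code
-- ===== Notes on version B (the rewrite author's own statement) =====
-- stated objective: simpler
-- what changed: The leading-zero-stripping while loop inside the D-prefix branch is replaced by a closed-form slice: keep the last max(length of the zero-lstripped digits, 4) digits in one step.
import Mathlib
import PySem

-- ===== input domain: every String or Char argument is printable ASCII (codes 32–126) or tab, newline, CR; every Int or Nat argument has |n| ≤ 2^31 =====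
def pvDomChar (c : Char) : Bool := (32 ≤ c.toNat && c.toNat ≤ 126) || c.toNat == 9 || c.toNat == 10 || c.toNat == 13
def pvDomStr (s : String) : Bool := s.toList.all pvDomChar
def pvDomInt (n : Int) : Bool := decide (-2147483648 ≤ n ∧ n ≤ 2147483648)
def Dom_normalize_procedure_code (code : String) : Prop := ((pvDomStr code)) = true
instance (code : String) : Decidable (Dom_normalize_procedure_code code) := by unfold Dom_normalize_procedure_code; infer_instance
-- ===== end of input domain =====

-- B replaces A's leading-zero-stripping while loop by a closed-form slice keeping the
-- last max(len(lstripped digits), 4) digits; objective: simpler (same outer guards).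

-- ===== PORT A =====
-- the while loop: while len(digits) > 4 and digits[0] == '0': digits = digits[1:]
def pvStripLoopA (ds : List Char) : List Char :=
  match ds with
  | [] => []
  | c :: rest => if 4 < (c :: rest).length ∧ c = '0' then pvStripLoopA rest else c :: rest

def normalize_procedure_code (code : String) : String :=
  if code.toList = [] then code
  else if PySem.Chars.startswith code.toList ['D'] ∧ 5 < code.toList.length ∧
          PySem.Chars.strIsdigit (PySem.List.slice code.toList (some 1) none) then
    let digits := PySem.List.slice code.toList (some 1) none   -- code[1:]
    let digits := if 4 < digits.length then pvStripLoopA digits else digits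
    String.ofList ('D' :: digits)
  else if ¬ PySem.Chars.startswith code.toList ['D'] ∧ PySem.Chars.strIsdigit code.toList then
    String.ofList ('D' :: code.toList)
  else code

-- ===== PORT B =====
def normalize_procedure_code_alt (code : String) : String :=
  if code.toList = [] then code
  else if PySem.Chars.startswith code.toList ['D'] ∧ 5 < code.toList.length ∧
          PySem.Chars.strIsdigit (PySem.List.slice code.toList (some 1) none) then
    let digits := PySem.List.slice code.toList (some 1) none   -- code[1:]
    let stripped := digits.dropWhile (fun c => c == '0')       -- digits.lstrip('0'), exact: drops leading '0' chars
    let keep := max stripped.length 4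
    -- digits[len(digits) - keep:] : the branch guarantees keep ≤ len(digits), so the slice
    -- start is a plain nonnegative drop — exact here
    String.ofList ('D' :: digits.drop (digits.length - keep))
  else if ¬ PySem.Chars.startswith code.toList ['D'] ∧ PySem.Chars.strIsdigit code.toList then
    String.ofList ('D' :: code.toList)
  else code

-- ===== PRECONDITION & SPEC =====
def Spec_normalize_procedure_code (code : String) (out : String) : Prop := out = normalize_procedure_code_alt code
instance (code : String) (out : String) : Decidable (Spec_normalize_procedure_code code out) := by unfold Spec_normalize_procedure_code; infer_instance

-- ===== CLAIM (what is proved, stated in full; the proofs are below) =====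
def Claim_equal_normalize_procedure_code : Prop := ∀ (code : String), Dom_normalize_procedure_code code → Spec_normalize_procedure_code code (normalize_procedure_code code)

-- ===== LEMMAS AND PROOFS =====

-- A's while loop is the closed-form drop of B
lemma pvStripLoopA_eq (ds : List Char) :
    pvStripLoopA ds = ds.drop (ds.length - max (ds.dropWhile (fun c => c == '0')).length 4) := by
  induction ds with
  | nil => simp [pvStripLoopA]
  | cons c rest ih =>
    by_cases h : 4 < (c :: rest).length ∧ c = '0'
    · obtain ⟨hlen, hc⟩ := h
      have hdw : (c :: rest).dropWhile (fun c => c == '0') = rest.dropWhile (fun c => c == '0') := by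
        simp [List.dropWhile, hc]
      have hk : max (rest.dropWhile (fun c => c == '0')).length 4 ≤ rest.length := by
        have h1 : (rest.dropWhile (fun c => c == '0')).length ≤ rest.length :=
          List.length_dropWhile_le _ _
        simp at hlen; omega
      rw [pvStripLoopA, if_pos ⟨hlen, hc⟩, ih, hdw]
      have : (c :: rest).length - max (rest.dropWhile (fun c => c == '0')).length 4 =
          (rest.length - max (rest.dropWhile (fun c => c == '0')).length 4) + 1 := by
        simp; omega
      rw [this, List.drop_succ_cons]
    · rw [pvStripLoopA, if_neg h]
      by_cases hc : c = '0'
      · -- then length ≤ 4, so the drop amount is 0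
        have hlen : (c :: rest).length ≤ 4 := by
          by_contra hl; exact h ⟨by omega, hc⟩
        have : (c :: rest).length - max ((c :: rest).dropWhile (fun c => c == '0')).length 4 = 0 := by
          omega
        rw [this, List.drop_zero]
      · have hcb : (c == '0') = false := by simp [hc]
        have hdw : (c :: rest).dropWhile (fun c => c == '0') = c :: rest := by
          simp [List.dropWhile, hcb]
        rw [hdw]
        have : (c :: rest).length - max (c :: rest).length 4 = 0 := by omega
        rw [this, List.drop_zero]

-- ===== VERDICT (by name: the statement is the Claim_ definition above) =====
theorem normalize_procedure_code_spec : Claim_equal_normalize_procedure_code := by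
  intro code _
  unfold Spec_normalize_procedure_code normalize_procedure_code normalize_procedure_code_alt
  by_cases h0 : code.toList = []
  · simp [h0]
  rw [if_neg h0, if_neg h0]
  by_cases h1 : PySem.Chars.startswith code.toList ['D'] ∧ 5 < code.toList.length ∧
      PySem.Chars.strIsdigit (PySem.List.slice code.toList (some 1) none)
  · rw [if_pos h1, if_pos h1]
    obtain ⟨-, hlen, -⟩ := h1
    have hslice : PySem.List.slice code.toList (some 1) none = code.toList.drop 1 := by
      rw [PySem.List.slice_some_none,
        show ((1:Int)) = ((1:Nat):Int) from rfl, PySem.List.clampIdx_natCast]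
      congr 1
      omega
    have hdl : 4 < (PySem.List.slice code.toList (some 1) none).length := by
      rw [hslice, List.length_drop]; omega
    simp only [if_pos hdl]
    rw [pvStripLoopA_eq]
  · rw [if_neg h1, if_neg h1]
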